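-- pv_equiv track=rewrite | github.com/zyy20009619/cluster | utils/dep_data_util.py | _del_package_contain_or_class_method
-- ===== SOURCE A (Python) =====
-- def _del_package_contain_or_class_method(package_contain_module, module_define, class_define, variable_map):
--     package_contain_class = dict()
--     package_contain_method = dict()
--     for pack in package_contain_module:
--         class_list = list()
--         method_list = list()
--         for module in package_contain_module[pack]:
--             if module in module_define:
--                 _del_module_contain(module_define[module], class_define, class_list, method_list, variable_map)
--         package_contain_class[pack] = class_list
--         package_contain_method[pack] = method_list
--
--     return package_contain_class, package_contain_method
--
-- def _del_module_contain(module_define_obj, class_define, class_list, method_list, variable_map):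
--     for obj in module_define_obj:
--         if variable_map[obj]['category'] == 'Class':
--             class_list.append(obj)
--             if obj in class_define:
--                 for c_obj in class_define[obj]:
--                     if variable_map[c_obj]['category'] == 'Function':
--                         method_list.append(c_obj)
--                     elif variable_map[c_obj]['category'] == 'Class':
--                         class_list.append(c_obj)
--         elif variable_map[obj]['category'] == 'Function':
--             method_list.append(obj)
-- ===== SOURCE B (Python) =====
-- def _del_package_contain_or_class_method(package_contain_module, module_define, class_define, variable_map):
--     # Classify one name once: a 'Class' contributes itself plus its class_define
--     # members split by category; a 'Function' contributes itself as a method.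
--     def classify(name):
--         cat = variable_map[name]['category']
--         if cat == 'Class':
--             cls, mth = [name], []
--             for c in class_define.get(name, []):
--                 c_cat = variable_map[c]['category']
--                 if c_cat == 'Function':
--                     mth.append(c)
--                 elif c_cat == 'Class':
--                     cls.append(c)
--             return cls, mth
--         if cat == 'Function':
--             return [], [name]
--         return [], []
--
--     def module_pair(objs):
--         cls, mth = [], []
--         for obj in objs:
--             c, m = classify(obj)
--             cls += c
--             mth += m
--         return cls, mth
--
--     # Compute each distinct relevant module's contribution once.
--     seen = dict.fromkeys(m for mods in package_contain_module.values() for m in mods)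
--     table = {m: module_pair(module_define[m]) for m in seen if m in module_define}
--
--     package_contain_class = {}
--     package_contain_method = {}
--     for pack, mods in package_contain_module.items():
--         cls, mth = [], []
--         for m in mods:
--             if m in table:
--                 c, f = table[m]
--                 cls += c
--                 mth += f
--         package_contain_class[pack] = cls
--         package_contain_method[pack] = mth
--     return package_contain_class, package_contain_method
-- ===== Notes on version B (the rewrite author's own statement) =====
-- stated objective: alternative
-- what changed: A re-classifies every module's definitions once per package that contains it via an inner mutating helper; B classifies each distinct module exactly once into a memo table of (class_list, method_list) pairs and then builds both per-package dicts by concatenating the precomputed pairs.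
import Mathlib
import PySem

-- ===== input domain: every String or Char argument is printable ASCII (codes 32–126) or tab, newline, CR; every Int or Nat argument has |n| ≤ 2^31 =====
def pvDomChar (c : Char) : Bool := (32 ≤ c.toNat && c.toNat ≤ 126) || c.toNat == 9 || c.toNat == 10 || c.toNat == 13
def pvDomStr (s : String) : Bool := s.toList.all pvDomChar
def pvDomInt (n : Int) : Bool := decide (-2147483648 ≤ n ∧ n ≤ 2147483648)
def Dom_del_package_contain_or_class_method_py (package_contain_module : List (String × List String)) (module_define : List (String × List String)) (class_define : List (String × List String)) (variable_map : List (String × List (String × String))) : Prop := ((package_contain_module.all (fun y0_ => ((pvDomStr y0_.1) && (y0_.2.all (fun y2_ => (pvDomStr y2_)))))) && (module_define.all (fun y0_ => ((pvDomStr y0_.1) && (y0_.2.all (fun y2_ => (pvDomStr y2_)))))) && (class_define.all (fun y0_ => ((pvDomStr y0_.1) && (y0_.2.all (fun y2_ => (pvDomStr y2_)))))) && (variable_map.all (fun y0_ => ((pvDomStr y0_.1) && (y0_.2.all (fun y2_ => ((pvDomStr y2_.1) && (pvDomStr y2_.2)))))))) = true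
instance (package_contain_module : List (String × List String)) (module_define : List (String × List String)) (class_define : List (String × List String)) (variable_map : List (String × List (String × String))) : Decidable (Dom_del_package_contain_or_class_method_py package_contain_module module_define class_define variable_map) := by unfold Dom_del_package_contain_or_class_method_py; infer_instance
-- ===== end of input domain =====

-- B restructures A: instead of re-classifying a module's definitions once per containing
-- package, it classifies each distinct module once into a memo table and then concatenates
-- the precomputed (class, method) pairs per package (objective: alternative decomposition).

-- ===== PORT A =====
-- variable_map[obj]['category']; Pre_ guarantees both keys exist, so the "" defaults
-- (standing for Python's KeyError) are never reached on admitted inputs.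
def pvCatA (variable_map : List (String × List (String × String))) (obj : String) : String :=
  PySem.Dict.getD (PySem.Dict.mk (PySem.Dict.getD (PySem.Dict.mk variable_map) obj [])) "category" ""

-- _del_module_contain: mutates class_list/method_list; ported as a fold over the pair
def pvModContainA (module_define_obj : List String) (class_define : List (String × List String)) (variable_map : List (String × List (String × String))) (acc : List String × List String) : List String × List String :=
  module_define_obj.foldl (fun a obj =>
    if pvCatA variable_map obj == "Class" then
      match (PySem.Dict.mk class_define).get? obj with
      | some cobjs =>
          cobjs.foldl (fun b c =>
            if pvCatA variable_map c == "Function" then (b.1, b.2 ++ [c])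
            else if pvCatA variable_map c == "Class" then (b.1 ++ [c], b.2)
            else b) (a.1 ++ [obj], a.2)
      | none => (a.1 ++ [obj], a.2)
    else if pvCatA variable_map obj == "Function" then (a.1, a.2 ++ [obj])
    else a) acc

def del_package_contain_or_class_method_py (package_contain_module : List (String × List String)) (module_define : List (String × List String)) (class_define : List (String × List String)) (variable_map : List (String × List (String × String))) : (List (String × List String)) × (List (String × List String)) :=
  let res := package_contain_module.foldl
    (fun (st : PySem.Dict String (List String) × PySem.Dict String (List String)) e =>
      let pr := (PySem.Dict.getD (PySem.Dict.mk package_contain_module) e.1 []).foldl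
        (fun a m =>
          if (PySem.Dict.mk module_define).contains m then
            pvModContainA (PySem.Dict.getD (PySem.Dict.mk module_define) m []) class_define variable_map a
          else a) (([] : List String), ([] : List String))
      (st.1.insert e.1 pr.1, st.2.insert e.1 pr.2))
    (PySem.Dict.empty, PySem.Dict.empty)
  (res.1.items, res.2.items)

-- ===== PORT B =====
-- variable_map[name]['category'], "" standing for the (Pre_-excluded) KeyError
def pvCatB (variable_map : List (String × List (String × String))) (name : String) : String :=
  match variable_map.find? (fun p => p.1 == name) with
  | some e =>
      match e.2.find? (fun q => q.1 == "category") with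
      | some q => q.2
      | none => ""
  | none => ""

-- d.get(k, []) / d[k] under a `k in d` guard
def pvGetList (d : List (String × List String)) (k : String) : List String :=
  match d.find? (fun p => p.1 == k) with
  | some e => e.2
  | none => []

def pvClassifyB (class_define : List (String × List String)) (variable_map : List (String × List (String × String))) (name : String) : List String × List String :=
  if pvCatB variable_map name == "Class" then
    (pvGetList class_define name).foldl (fun pr c =>
      if pvCatB variable_map c == "Function" then (pr.1, pr.2 ++ [c])
      else if pvCatB variable_map c == "Class" then (pr.1 ++ [c], pr.2)
      else pr) ([name], [])
  else if pvCatB variable_map name == "Function" then ([], [name])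
  else ([], [])

def pvModulePairB (objs : List String) (class_define : List (String × List String)) (variable_map : List (String × List (String × String))) : List String × List String :=
  objs.foldl (fun pr o =>
    (pr.1 ++ (pvClassifyB class_define variable_map o).1, pr.2 ++ (pvClassifyB class_define variable_map o).2)) ([], [])

def del_package_contain_or_class_method_py_alt (package_contain_module : List (String × List String)) (module_define : List (String × List String)) (class_define : List (String × List String)) (variable_map : List (String × List (String × String))) : (List (String × List String)) × (List (String × List String)) :=
  let packs := PySem.List.dedup (package_contain_module.map (fun e => e.1))
  let seen := PySem.List.dedup (packs.flatMap (fun p => pvGetList package_contain_module p))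
  let table := seen.filterMap (fun m =>
    (module_define.find? (fun e => e.1 == m)).map (fun e => (m, pvModulePairB e.2 class_define variable_map)))
  let rows := packs.map (fun p =>
    (p, (pvGetList package_contain_module p).foldl (fun pr m =>
          match table.find? (fun e => e.1 == m) with
          | some e => (pr.1 ++ e.2.1, pr.2 ++ e.2.2)
          | none => pr) ([], [])))
  (rows.map (fun r => (r.1, r.2.1)), rows.map (fun r => (r.1, r.2.2)))

-- ===== PRECONDITION & SPEC =====
def pvHasCat (variable_map : List (String × List (String × String))) (o : String) : Bool :=
  match variable_map.find? (fun p => p.1 == o) with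
  | some e => (e.2.find? (fun q => q.1 == "category")).isSome
  | none => false

-- Pre_ excludes exactly the inputs on which Python A raises KeyError: some object that gets
-- classified (directly in a processed module, or as a member of a classified class) is missing
-- from variable_map or lacks a 'category' entry.
def Pre_del_package_contain_or_class_method_py (package_contain_module : List (String × List String)) (module_define : List (String × List String)) (class_define : List (String × List String)) (variable_map : List (String × List (String × String))) : Prop :=
  ∀ e ∈ package_contain_module, ∀ m ∈ pvGetList package_contain_module e.1,
    (module_define.find? (fun q => q.1 == m)).isSome = true →
      ∀ o ∈ pvGetList module_define m,
        pvHasCat variable_map o = true ∧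
        (pvCatB variable_map o = "Class" → ∀ c ∈ pvGetList class_define o, pvHasCat variable_map c = true)
instance (package_contain_module : List (String × List String)) (module_define : List (String × List String)) (class_define : List (String × List String)) (variable_map : List (String × List (String × String))) : Decidable (Pre_del_package_contain_or_class_method_py package_contain_module module_define class_define variable_map) := by unfold Pre_del_package_contain_or_class_method_py; infer_instance

def pvWitness_del_package_contain_or_class_method_py : (List (String × List String)) × (List (String × List String)) × (List (String × List String)) × (List (String × List (String × String))) :=
  ([("p", ["m", "n"])], [("m", ["C", "f"])], [("C", ["g", "D"])],
   [("C", [("category", "Class")]), ("f", [("category", "Function")]), ("g", [("category", "Function")]), ("D", [("category", "Class")])])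

def Spec_del_package_contain_or_class_method_py (package_contain_module : List (String × List String)) (module_define : List (String × List String)) (class_define : List (String × List String)) (variable_map : List (String × List (String × String))) (out : (List (String × List String)) × (List (String × List String))) : Prop := out = del_package_contain_or_class_method_py_alt package_contain_module module_define class_define variable_map
instance (package_contain_module : List (String × List String)) (module_define : List (String × List String)) (class_define : List (String × List String)) (variable_map : List (String × List (String × String))) (out : (List (String × List String)) × (List (String × List String))) : Decidable (Spec_del_package_contain_or_class_method_py package_contain_module module_define class_define variable_map out) := by unfold Spec_del_package_contain_or_class_method_py; infer_instance

-- ===== CLAIM (what is proved, stated in full; the proofs are below) =====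
def Claim_equal_del_package_contain_or_class_method_py : Prop := ∀ (package_contain_module : List (String × List String)) (module_define : List (String × List String)) (class_define : List (String × List String)) (variable_map : List (String × List (String × String))), Dom_del_package_contain_or_class_method_py package_contain_module module_define class_define variable_map → Pre_del_package_contain_or_class_method_py package_contain_module module_define class_define variable_map → Spec_del_package_contain_or_class_method_py package_contain_module module_define class_define variable_map (del_package_contain_or_class_method_py package_contain_module module_define class_define variable_map)

-- ===== LEMMAS AND PROOFS =====

-- per-object contributions to the class list / method list (proof-side normal forms)
def pvuC (vm : List (String × List (String × String))) (c : String) : List String :=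
  if pvCatB vm c == "Function" then [] else if pvCatB vm c == "Class" then [c] else []
def pvvC (vm : List (String × List (String × String))) (c : String) : List String :=
  if pvCatB vm c == "Function" then [c] else []
def pvU (cd : List (String × List String)) (vm : List (String × List (String × String))) (o : String) : List String :=
  if pvCatB vm o == "Class" then o :: (pvGetList cd o).flatMap (pvuC vm) else []
def pvV (cd : List (String × List String)) (vm : List (String × List (String × String))) (o : String) : List String :=
  if pvCatB vm o == "Class" then (pvGetList cd o).flatMap (pvvC vm)
  else if pvCatB vm o == "Function" then [o] else []
def pvMU (md cd : List (String × List String)) (vm : List (String × List (String × String))) (m : String) : List String :=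
  if (md.find? (fun q => q.1 == m)).isSome then (pvGetList md m).flatMap (pvU cd vm) else []
def pvMV (md cd : List (String × List String)) (vm : List (String × List (String × String))) (m : String) : List String :=
  if (md.find? (fun q => q.1 == m)).isSome then (pvGetList md m).flatMap (pvV cd vm) else []
def pvRow (pcm md cd : List (String × List String)) (vm : List (String × List (String × String))) (p : String) : List String × List String :=
  ((pvGetList pcm p).flatMap (pvMU md cd vm), (pvGetList pcm p).flatMap (pvMV md cd vm))

theorem get?_mk_eq_find? {κ ν : Type} [BEq κ] (l : List (κ × ν)) (k : κ) :
    (PySem.Dict.mk l).get? k = (l.find? (fun p => p.1 == k)).map (fun p => p.2) := by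
  induction l with
  | nil => rfl
  | cons e t ih =>
      obtain ⟨a, b⟩ := e
      rw [PySem.Dict.get?_mk_cons]
      by_cases h : (a == k) = true <;> simp [h, ih]

theorem getD_mk_eq_pvGetList (d : List (String × List String)) (k : String) :
    PySem.Dict.getD (PySem.Dict.mk d) k [] = pvGetList d k := by
  rw [PySem.Dict.getD_eq_get?_getD, get?_mk_eq_find?, pvGetList]
  cases d.find? (fun p => p.1 == k) <;> simp

theorem catA_eq_catB (vm : List (String × List (String × String))) (o : String) :
    pvCatA vm o = pvCatB vm o := by
  unfold pvCatA pvCatB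
  cases h : vm.find? (fun p => p.1 == o) with
  | none => simp [PySem.Dict.getD_eq_get?_getD, get?_mk_eq_find?, h]
  | some e =>
      cases h2 : e.2.find? (fun q => q.1 == "category") with
      | none => simp [PySem.Dict.getD_eq_get?_getD, get?_mk_eq_find?, h, h2]
      | some q => simp [PySem.Dict.getD_eq_get?_getD, get?_mk_eq_find?, h, h2]

theorem innerFold_eq (vm : List (String × List (String × String))) (cobjs : List String) (x y : List String) :
    cobjs.foldl (fun (b : List String × List String) c =>
        if pvCatB vm c == "Function" then (b.1, b.2 ++ [c])
        else if pvCatB vm c == "Class" then (b.1 ++ [c], b.2)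
        else b) (x, y)
      = (x ++ cobjs.flatMap (pvuC vm), y ++ cobjs.flatMap (pvvC vm)) := by
  have hstep : (fun (b : List String × List String) c =>
      if pvCatB vm c == "Function" then (b.1, b.2 ++ [c])
      else if pvCatB vm c == "Class" then (b.1 ++ [c], b.2)
      else b) = fun b c => (b.1 ++ pvuC vm c, b.2 ++ pvvC vm c) := by
    funext b c
    unfold pvuC pvvC
    by_cases h1 : pvCatB vm c = "Function" <;> by_cases h2 : pvCatB vm c = "Class" <;> simp [h1, h2]
  rw [hstep, PySem.List.foldl_prod_mk (f := fun a c => a ++ pvuC vm c) (g := fun a c => a ++ pvvC vm c),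
      PySem.List.foldl_append_eq_flatMap, PySem.List.foldl_append_eq_flatMap]

theorem modContainA_eq (objs : List String) (cd : List (String × List String)) (vm : List (String × List (String × String))) (acc : List String × List String) :
    pvModContainA objs cd vm acc = (acc.1 ++ objs.flatMap (pvU cd vm), acc.2 ++ objs.flatMap (pvV cd vm)) := by
  unfold pvModContainA
  have hstep : (fun (a : List String × List String) obj =>
      if pvCatA vm obj == "Class" then
        match (PySem.Dict.mk cd).get? obj with
        | some cobjs =>
            cobjs.foldl (fun b c =>
              if pvCatA vm c == "Function" then (b.1, b.2 ++ [c])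
              else if pvCatA vm c == "Class" then (b.1 ++ [c], b.2)
              else b) (a.1 ++ [obj], a.2)
        | none => (a.1 ++ [obj], a.2)
      else if pvCatA vm obj == "Function" then (a.1, a.2 ++ [obj])
      else a) = fun a obj => (a.1 ++ pvU cd vm obj, a.2 ++ pvV cd vm obj) := by
    funext a obj
    simp only [catA_eq_catB, get?_mk_eq_find?]
    by_cases h1 : pvCatB vm obj = "Class"
    · have hb : (pvCatB vm obj == "Class") = true := by simp [h1]
      rw [if_pos hb]
      cases hf : cd.find? (fun p => p.1 == obj) with
      | none => simp [pvU, pvV, pvGetList, hf, h1]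
      | some e =>
          simp only [Option.map_some]
          rw [innerFold_eq]
          simp [pvU, pvV, pvGetList, hf, h1]
    · by_cases h2 : pvCatB vm obj = "Function" <;> simp [pvU, pvV, h1, h2]
  rw [hstep, PySem.List.foldl_prod_mk (f := fun a o => a ++ pvU cd vm o) (g := fun a o => a ++ pvV cd vm o),
      PySem.List.foldl_append_eq_flatMap, PySem.List.foldl_append_eq_flatMap]

theorem classifyB_eq (cd : List (String × List String)) (vm : List (String × List (String × String))) (name : String) :
    pvClassifyB cd vm name = (pvU cd vm name, pvV cd vm name) := by
  unfold pvClassifyB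
  by_cases h1 : pvCatB vm name = "Class"
  · have hb : (pvCatB vm name == "Class") = true := by simp [h1]
    rw [if_pos hb, innerFold_eq]
    simp [pvU, pvV, h1]
  · by_cases h2 : pvCatB vm name = "Function" <;> simp [pvU, pvV, h1, h2]

theorem modulePairB_eq (objs : List String) (cd : List (String × List String)) (vm : List (String × List (String × String))) :
    pvModulePairB objs cd vm = (objs.flatMap (pvU cd vm), objs.flatMap (pvV cd vm)) := by
  unfold pvModulePairB
  simp only [classifyB_eq]
  rw [PySem.List.foldl_prod_mk (f := fun a o => a ++ pvU cd vm o) (g := fun a o => a ++ pvV cd vm o),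
      PySem.List.foldl_append_eq_flatMap, PySem.List.foldl_append_eq_flatMap]
  simp

theorem find?_filterMap_keyed {ν : Type} (l : List String) (f : String → Option ν) (m : String) :
    (l.filterMap (fun k => (f k).map (fun v => (k, v)))).find? (fun p => p.1 == m)
      = if m ∈ l then (f m).map (fun v => (m, v)) else none := by
  induction l with
  | nil => simp
  | cons k t ih =>
      by_cases hk : k = m
      · subst hk
        cases hf : f k with
        | none => simp [hf, ih]
        | some v => simp [hf]
      · cases hf : f k with
        | none => simp [hf, ih, hk, Ne.symm hk]
        | some v => simp [hf, ih, hk, Ne.symm hk]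

-- A's per-package loop computes pvRow
theorem packA_eq (pcm md cd : List (String × List String)) (vm : List (String × List (String × String))) (p : String) :
    ((PySem.Dict.getD (PySem.Dict.mk pcm) p []).foldl
      (fun (a : List String × List String) m =>
        if (PySem.Dict.mk md).contains m then
          pvModContainA (PySem.Dict.getD (PySem.Dict.mk md) m []) cd vm a
        else a) ([], []))
    = pvRow pcm md cd vm p := by
  rw [getD_mk_eq_pvGetList]
  have hstep : (fun (a : List String × List String) m =>
      if (PySem.Dict.mk md).contains m then
        pvModContainA (PySem.Dict.getD (PySem.Dict.mk md) m []) cd vm a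
      else a) = fun a m => (a.1 ++ pvMU md cd vm m, a.2 ++ pvMV md cd vm m) := by
    funext a m
    rw [PySem.Dict.contains_eq_isSome_get?, get?_mk_eq_find?]
    by_cases hs : (md.find? (fun q => q.1 == m)).isSome = true
    · simp only [Option.isSome_map, hs, if_true, modContainA_eq, getD_mk_eq_pvGetList, pvMU, pvMV]
    · simp only [Option.isSome_map, hs, if_false, pvMU, pvMV]
      simp [Bool.not_eq_true] at hs
      simp [hs]
  rw [hstep, PySem.List.foldl_prod_mk (f := fun a m => a ++ pvMU md cd vm m) (g := fun a m => a ++ pvMV md cd vm m),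
      PySem.List.foldl_append_eq_flatMap, PySem.List.foldl_append_eq_flatMap, pvRow]
  simp

-- B's per-package loop (with the table) computes pvRow too, for packs actually present
theorem packB_eq (pcm md cd : List (String × List String)) (vm : List (String × List (String × String))) (p : String)
    (hp : p ∈ PySem.List.dedup (pcm.map (fun e => e.1))) :
    ((pvGetList pcm p).foldl (fun (pr : List String × List String) m =>
        match ((PySem.List.dedup ((PySem.List.dedup (pcm.map (fun e => e.1))).flatMap (fun q => pvGetList pcm q))).filterMap
                (fun m' => (md.find? (fun e => e.1 == m')).map (fun e => (m', pvModulePairB e.2 cd vm)))).find? (fun e => e.1 == m) with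
        | some e => (pr.1 ++ e.2.1, pr.2 ++ e.2.2)
        | none => pr) ([], []))
    = pvRow pcm md cd vm p := by
  have hcongr : ∀ m ∈ pvGetList pcm p, ∀ (pr : List String × List String),
      (match ((PySem.List.dedup ((PySem.List.dedup (pcm.map (fun e => e.1))).flatMap (fun q => pvGetList pcm q))).filterMap
                (fun m' => (md.find? (fun e => e.1 == m')).map (fun e => (m', pvModulePairB e.2 cd vm)))).find? (fun e => e.1 == m) with
        | some e => (pr.1 ++ e.2.1, pr.2 ++ e.2.2)
        | none => pr)
      = (pr.1 ++ pvMU md cd vm m, pr.2 ++ pvMV md cd vm m) := by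
    intro m hm pr
    have hmem : m ∈ PySem.List.dedup ((PySem.List.dedup (pcm.map (fun e => e.1))).flatMap (fun q => pvGetList pcm q)) := by
      rw [PySem.List.dedup_eq_ofList, PySem.Set.mem_ofList]
      exact List.mem_flatMap.mpr ⟨p, hp, hm⟩
    have hfn : (fun m' => (md.find? (fun e => e.1 == m')).map (fun e => (m', pvModulePairB e.2 cd vm)))
        = fun m' => ((md.find? (fun e => e.1 == m')).map (fun e => pvModulePairB e.2 cd vm)).map (fun v => (m', v)) := by
      funext m'; rw [Option.map_map]; rfl
    rw [hfn, find?_filterMap_keyed, if_pos hmem]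
    cases hmd : md.find? (fun e => e.1 == m) with
    | none => simp [pvMU, pvMV, hmd]
    | some e =>
        simp only [Option.map_some]
        simp [pvMU, pvMV, hmd, modulePairB_eq, pvGetList]
  rw [PySem.List.foldl_congr_mem' (pvGetList pcm p) _ (fun pr m => (pr.1 ++ pvMU md cd vm m, pr.2 ++ pvMV md cd vm m)) ([], []) hcongr,
      PySem.List.foldl_prod_mk (f := fun a m => a ++ pvMU md cd vm m) (g := fun a m => a ++ pvMV md cd vm m),
      PySem.List.foldl_append_eq_flatMap, PySem.List.foldl_append_eq_flatMap, pvRow]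
  simp

theorem getD_foldl_insert_fun {α ν : Type} (l : List (String × α)) (H : String → ν) (d : PySem.Dict String ν) (k : String) (dflt : ν) :
    (l.foldl (fun d e => d.insert e.1 (H e.1)) d).getD k dflt
      = if k ∈ l.map (fun e => e.1) then H k else d.getD k dflt := by
  induction l generalizing d with
  | nil => simp
  | cons e t ih =>
      rw [List.foldl_cons, ih]
      by_cases hk : k = e.1
      · subst hk; simp
      · by_cases ht : k ∈ t.map (fun e => e.1) <;> simp [ht, hk, PySem.Dict.getD_insert]

theorem items_foldl_insert_fun {α ν : Type} (l : List (String × α)) (H : String → ν) (dflt : ν) :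
    (l.foldl (fun d e => d.insert e.1 (H e.1)) (PySem.Dict.empty : PySem.Dict String ν)).items
      = (PySem.List.dedup (l.map (fun e => e.1))).map (fun k => (k, H k)) := by
  have hkeys : (l.foldl (fun d e => d.insert e.1 (H e.1)) (PySem.Dict.empty : PySem.Dict String ν)).keys
      = PySem.Set.ofList (l.map (fun e => e.1)) := by
    rw [PySem.Dict.keys_foldl_insert_key l (fun e => e.1) (fun _ e => H e.1), PySem.Dict.keys_empty,
        PySem.Set.update_nil_left]
  have hnd : (l.foldl (fun d e => d.insert e.1 (H e.1)) (PySem.Dict.empty : PySem.Dict String ν)).keys.Nodup :=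
    PySem.Dict.nodup_keys_foldl_insert_key l (fun e => e.1) (fun _ e => H e.1) _ (by simp [PySem.Dict.keys_empty])
  rw [PySem.Dict.items_eq_map_keys _ hnd dflt, hkeys, PySem.List.dedup_eq_ofList]
  apply List.map_congr_left
  intro k hk
  rw [getD_foldl_insert_fun, if_pos ((PySem.Set.mem_ofList _ _).mp hk)]

theorem ports_agree (package_contain_module : List (String × List String)) (module_define : List (String × List String)) (class_define : List (String × List String)) (variable_map : List (String × List (String × String))) :
    del_package_contain_or_class_method_py package_contain_module module_define class_define variable_map
      = del_package_contain_or_class_method_py_alt package_contain_module module_define class_define variable_map := by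
  unfold del_package_contain_or_class_method_py del_package_contain_or_class_method_py_alt
  simp only []
  rw [PySem.List.foldl_prod_mk
      (f := fun (d : PySem.Dict String (List String)) (e : String × List String) =>
        d.insert e.1 (((PySem.Dict.getD (PySem.Dict.mk package_contain_module) e.1 []).foldl
          (fun a m =>
            if (PySem.Dict.mk module_define).contains m then
              pvModContainA (PySem.Dict.getD (PySem.Dict.mk module_define) m []) class_define variable_map a
            else a) ([], [])).1))
      (g := fun (d : PySem.Dict String (List String)) (e : String × List String) =>
        d.insert e.1 (((PySem.Dict.getD (PySem.Dict.mk package_contain_module) e.1 []).foldl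
          (fun a m =>
            if (PySem.Dict.mk module_define).contains m then
              pvModContainA (PySem.Dict.getD (PySem.Dict.mk module_define) m []) class_define variable_map a
            else a) ([], [])).2))]
  rw [items_foldl_insert_fun (H := fun k => ((PySem.Dict.getD (PySem.Dict.mk package_contain_module) k []).foldl
          (fun a m =>
            if (PySem.Dict.mk module_define).contains m then
              pvModContainA (PySem.Dict.getD (PySem.Dict.mk module_define) m []) class_define variable_map a
            else a) ([], [])).1) (dflt := []),
      items_foldl_insert_fun (H := fun k => ((PySem.Dict.getD (PySem.Dict.mk package_contain_module) k []).foldl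
          (fun a m =>
            if (PySem.Dict.mk module_define).contains m then
              pvModContainA (PySem.Dict.getD (PySem.Dict.mk module_define) m []) class_define variable_map a
            else a) ([], [])).2) (dflt := [])]
  simp only [List.map_map]
  refine Prod.ext_iff.mpr ⟨?_, ?_⟩ <;>
  · apply List.map_congr_left
    intro p hp
    simp only [Function.comp]
    rw [packA_eq, ← packB_eq package_contain_module module_define class_define variable_map p hp]

-- ===== VERDICT (by name: the statement is the Claim_ definition above) =====
theorem del_package_contain_or_class_method_py_spec : Claim_equal_del_package_contain_or_class_method_py := by
  intro pcm md cd vm _ _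
  unfold Spec_del_package_contain_or_class_method_py
  exact ports_agree pcm md cd vm
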